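-- pv_equiv track=rewrite | github.com/odormond/adventofcode | 2023/14/fourteen.py | parse
-- ===== SOURCE A (Python) =====
-- def parse(data):
--     rocks = [
--         (l, c, symbol)
--         for l, line in enumerate(data.splitlines())
--         for c, symbol in enumerate(line)
--         if symbol != '.'
--     ]
--     rounds = {(l, c) for l, c, s in rocks if s == 'O'}
--     cubes = {(l, c) for l, c, s in rocks if s == '#'}
--     return rounds, cubes
-- ===== SOURCE B (Python) =====
-- def parse(data):
--     # One flat scan over the raw string with explicit line/column counters:
--     # no splitlines, no enumerate, no intermediate rock list.
--     rounds = set()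
--     cubes = set()
--     l = c = 0
--     i = 0
--     n = len(data)
--     while i < n:
--         ch = data[i]
--         if ch == '\r':
--             if i + 1 < n and data[i + 1] == '\n':
--                 i += 1
--             l += 1
--             c = 0
--         elif ch == '\n':
--             l += 1
--             c = 0
--         else:
--             if ch == 'O':
--                 rounds.add((l, c))
--             elif ch == '#':
--                 cubes.add((l, c))
--             c += 1
--         i += 1
--     return rounds, cubes
-- ===== Notes on version B (the rewrite author's own statement) =====
-- stated objective: alternative
-- what changed: Replaces the splitlines+enumerate comprehension and the two filtering set-comprehensions over an intermediate rock-triple list by a single flat index scan over the raw string that maintains explicit line/column counters and handles \n, \r and \r\n newlines itself, adding each rock directly to the proper set.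
import Mathlib
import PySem

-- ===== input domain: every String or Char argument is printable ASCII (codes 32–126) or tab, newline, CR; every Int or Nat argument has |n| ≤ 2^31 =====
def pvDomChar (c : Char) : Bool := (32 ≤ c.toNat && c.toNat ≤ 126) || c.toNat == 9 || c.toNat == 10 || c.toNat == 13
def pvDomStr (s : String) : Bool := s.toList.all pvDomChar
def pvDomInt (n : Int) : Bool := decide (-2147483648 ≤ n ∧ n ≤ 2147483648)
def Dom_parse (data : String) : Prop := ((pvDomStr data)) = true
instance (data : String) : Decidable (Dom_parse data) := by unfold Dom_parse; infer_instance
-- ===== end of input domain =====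

-- B replaces splitlines+enumerate and the two filtering passes over an intermediate rock
-- list by a single flat scan of the raw string with explicit line/column counters.

-- ===== PORT A =====
def parse (data : String) : (List (Int × Int)) × (List (Int × Int)) :=
  let rocks : List (Int × Int × Char) :=
    (PySem.List.enumerate (PySem.Str.splitlines data)).flatMap
      (fun p => (PySem.List.enumerate p.2.toList).filterMap
        (fun q => if q.2 ≠ '.' then some (p.1, q.1, q.2) else none))
  let rounds : PySem.Set (Int × Int) :=
    PySem.Set.ofList ((rocks.filter (fun t => t.2.2 == 'O')).map (fun t => (t.1, t.2.1)))
  let cubes : PySem.Set (Int × Int) :=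
    PySem.Set.ofList ((rocks.filter (fun t => t.2.2 == '#')).map (fun t => (t.1, t.2.1)))
  (rounds, cubes)

-- ===== PORT B =====
-- Source B's while-loop over the character index, as structural recursion on the character
-- list: the '\r' lookahead at data[i+1] becomes the two-character pattern below.
def parseAltGo (s : List Char) (l c : Int)
    (acc : PySem.Set (Int × Int) × PySem.Set (Int × Int)) :
    PySem.Set (Int × Int) × PySem.Set (Int × Int) :=
  match s with
  | [] => acc
  | '\r' :: '\n' :: rest => parseAltGo rest (l + 1) 0 acc
  | ch :: rest =>
    if ch = '\r' then parseAltGo rest (l + 1) 0 acc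
    else if ch = '\n' then parseAltGo rest (l + 1) 0 acc
    else
      parseAltGo rest l (c + 1)
        (if ch = 'O' then (PySem.Set.add acc.1 (l, c), acc.2)
         else if ch = '#' then (acc.1, PySem.Set.add acc.2 (l, c))
         else acc)

def parse_alt (data : String) : (List (Int × Int)) × (List (Int × Int)) :=
  parseAltGo data.toList 0 0 ([], [])

-- ===== PRECONDITION & SPEC =====
def Spec_parse (data : String) (out : (List (Int × Int)) × (List (Int × Int))) : Prop := out = parse_alt data
instance (data : String) (out : (List (Int × Int)) × (List (Int × Int))) : Decidable (Spec_parse data out) := by unfold Spec_parse; infer_instance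

-- ===== CLAIM (what is proved, stated in full; the proofs are below) =====
def Claim_equal_parse : Prop := ∀ (data : String), Dom_parse data → Spec_parse data (parse data)

-- ===== LEMMAS AND PROOFS =====

-- The per-character update on (rounds, cubes), abstracted for the proofs.
def pvStep (l : Int) (acc : PySem.Set (Int × Int) × PySem.Set (Int × Int)) (q : Int × Char) :
    PySem.Set (Int × Int) × PySem.Set (Int × Int) :=
  if q.2 = 'O' then (PySem.Set.add acc.1 (l, q.1), acc.2)
  else if q.2 = '#' then (acc.1, PySem.Set.add acc.2 (l, q.1))
  else acc

-- the triples A's comprehension extracts from one enumerated line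
def pvTriples (l : Int) (qs : List (Int × Char)) : List (Int × Int × Char) :=
  qs.filterMap (fun q => if q.2 ≠ '.' then some (l, q.1, q.2) else none)

def pvRounds (ts : List (Int × Int × Char)) : List (Int × Int) :=
  (ts.filter (fun t => t.2.2 == 'O')).map (fun t => (t.1, t.2.1))

def pvCubes (ts : List (Int × Int × Char)) : List (Int × Int) :=
  (ts.filter (fun t => t.2.2 == '#')).map (fun t => (t.1, t.2.1))

theorem pvRounds_append (xs ys : List (Int × Int × Char)) :
    pvRounds (xs ++ ys) = pvRounds xs ++ pvRounds ys := by
  simp [pvRounds]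

theorem pvCubes_append (xs ys : List (Int × Int × Char)) :
    pvCubes (xs ++ ys) = pvCubes xs ++ pvCubes ys := by
  simp [pvCubes]

-- folding pvStep over one enumerated line = updating both sets with that line's rounds/cubes
theorem pvStep_fold (l : Int) (qs : List (Int × Char))
    (r c : PySem.Set (Int × Int)) :
    qs.foldl (pvStep l) (r, c) =
      (PySem.Set.update r (pvRounds (pvTriples l qs)),
       PySem.Set.update c (pvCubes (pvTriples l qs))) := by
  induction qs generalizing r c with
  | nil => simp [pvTriples, pvRounds, pvCubes, PySem.Set.update]
  | cons q qs ih =>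
    by_cases hO : q.2 = 'O'
    · simp [pvStep, pvTriples, pvRounds, pvCubes, hO, ih, PySem.Set.update_cons]
    · by_cases hC : q.2 = '#'
      · simp [pvStep, pvTriples, pvRounds, pvCubes, hC, ih, PySem.Set.update_cons]
      · by_cases hD : q.2 = '.'
        · simp [pvStep, pvTriples, pvRounds, pvCubes, hD, ih]
        · simp [pvStep, pvTriples, pvRounds, pvCubes, hO, hC, hD, ih]

-- the fold of pvStep over all enumerated lines
def pvLineFold (l : Int) (lines : List (List Char))
    (acc : PySem.Set (Int × Int) × PySem.Set (Int × Int)) :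
    PySem.Set (Int × Int) × PySem.Set (Int × Int) :=
  (PySem.List.enumerate lines l).foldl
    (fun a p => (PySem.List.enumerate p.2).foldl (pvStep p.1) a) acc

theorem pvLineFold_cons (l : Int) (ln : List Char) (lns : List (List Char)) (acc) :
    pvLineFold l (ln :: lns) acc =
      pvLineFold (l + 1) lns ((PySem.List.enumerate ln).foldl (pvStep l) acc) := by
  simp [pvLineFold, PySem.List.enumerate_cons]

-- fold of pvStep over all lines = updating both sets with all rounds/cubes (A's value)
theorem pvLineFold_eq (lines : List (List Char)) (l : Int) (r c : PySem.Set (Int × Int)) :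
    pvLineFold l lines (r, c) =
      (PySem.Set.update r (pvRounds ((PySem.List.enumerate lines l).flatMap
          (fun p => pvTriples p.1 (PySem.List.enumerate p.2)))),
       PySem.Set.update c (pvCubes ((PySem.List.enumerate lines l).flatMap
          (fun p => pvTriples p.1 (PySem.List.enumerate p.2))))) := by
  induction lines generalizing l r c with
  | nil => simp [pvLineFold, PySem.Set.update, pvRounds, pvCubes]
  | cons ln lns ih =>
    rw [pvLineFold_cons, pvStep_fold, ih]
    simp only [PySem.List.enumerate_cons, List.flatMap_cons,
      pvRounds_append, pvCubes_append, PySem.Set.update_append]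

-- A's result is the pvStep fold over the enumerated split lines
theorem parse_as_fold (data : String) :
    parse data = pvLineFold 0 ((PySem.Str.splitlines data).map String.toList) ([], []) := by
  have hmap : ∀ (lines : List String) (l : Int),
      PySem.List.enumerate (lines.map String.toList) l =
        (PySem.List.enumerate lines l).map (fun p => (p.1, p.2.toList)) := by
    intro lines
    induction lines with
    | nil => intro l; simp [PySem.List.enumerate_nil]
    | cons x xs ih => intro l; simp [PySem.List.enumerate_cons, ih]
  rw [pvLineFold_eq]
  simp only [hmap, List.flatMap_map]
  simp only [parse, pvTriples, pvRounds, pvCubes, PySem.Set.update_nil_left]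


-- every character of a Dom string that splitlines breaks on is '\n' or '\r'
-- 'pvConsFirst pre lines': prepend pre to the first line (creating it if there is none)
def pvConsFirst (pre : List Char) (lines : List (List Char)) : List (List Char) :=
  match lines with
  | [] => if pre = [] then [] else [pre]
  | ln :: lns => (pre ++ ln) :: lns

theorem pvConsFirst_nil (lines : List (List Char)) : pvConsFirst [] lines = lines := by
  cases lines <;> simp [pvConsFirst]

-- one-step evaluation lemmas for splitlines' worker
theorem pvGo_nil (isB : Char → Bool) (cur : List Char) (accL : List (List Char)) :
    PySem.Chars.splitlines.go isB [] cur accL =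
      (if cur.isEmpty then accL.reverse else (cur.reverse :: accL).reverse) := by
  rw [PySem.Chars.splitlines.go.eq_def]

theorem pvGo_crlf (isB : Char → Bool) (rest cur : List Char) (accL : List (List Char)) :
    PySem.Chars.splitlines.go isB ('\r' :: '\n' :: rest) cur accL =
      PySem.Chars.splitlines.go isB rest [] (cur.reverse :: accL) := by
  rw [PySem.Chars.splitlines.go.eq_def]
  split
  · rename_i heq; cases heq
  · rename_i heq
    injection heq with h1 h2
    injection h2 with h3 h4
    subst h4; rfl
  · rename_i hno heq
    injection heq with h1 h2
    exact ((hno rest h1.symm h2.symm).elim)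

theorem pvGo_cons (isB : Char → Bool) (ch : Char) (rest cur : List Char)
    (accL : List (List Char)) (h : ¬ (ch = '\r' ∧ ∃ r', rest = '\n' :: r')) :
    PySem.Chars.splitlines.go isB (ch :: rest) cur accL =
      (if isB ch then PySem.Chars.splitlines.go isB rest [] (cur.reverse :: accL)
       else PySem.Chars.splitlines.go isB rest (ch :: cur) accL) := by
  rw [PySem.Chars.splitlines.go.eq_def]
  split
  · rename_i heq; cases heq
  · rename_i r' heq
    injection heq with h1 h2
    exact absurd ⟨h1, r', h2⟩ h
  · rename_i heq
    injection heq with h1 h2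
    subst h1; subst h2; rfl

-- decomposition of splitlines' worker: the accumulators factor out
theorem pvGo_decomp (isB : Char → Bool) :
    ∀ (n : Nat) (s : List Char), s.length ≤ n → ∀ (cur : List Char) (accL : List (List Char)),
      PySem.Chars.splitlines.go isB s cur accL =
        accL.reverse ++ pvConsFirst cur.reverse (PySem.Chars.splitlines.go isB s [] []) := by
  intro n
  induction n with
  | zero =>
    intro s hs cur accL
    have : s = [] := by cases s <;> simp_all
    subst this
    rw [pvGo_nil, pvGo_nil]
    by_cases hc : cur = [] <;> simp [hc, pvConsFirst]
  | succ n ih =>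
    intro s hs cur accL
    by_cases hcr : ∃ rest, s = '\r' :: '\n' :: rest
    · obtain ⟨rest, rfl⟩ := hcr
      rw [pvGo_crlf, pvGo_crlf]
      simp only [List.reverse_nil]
      rw [ih rest (by simp at hs; omega), ih rest (by simp at hs; omega) [] [[]]]
      simp [pvConsFirst]
    · rcases s with _ | ⟨ch, rest⟩
      · rw [pvGo_nil, pvGo_nil]
        by_cases hc : cur = [] <;> simp [hc, pvConsFirst]
      · have hns : ¬ (ch = '\r' ∧ ∃ r', rest = '\n' :: r') := by
          rintro ⟨rfl, r', rfl⟩; exact hcr ⟨r', rfl⟩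
        rw [pvGo_cons isB ch rest cur accL hns, pvGo_cons isB ch rest [] [] hns]
        by_cases hb : isB ch = true
        · simp only [hb, if_true, List.reverse_nil]
          rw [ih rest (by simp at hs; omega), ih rest (by simp at hs; omega) [] [[]]]
          simp [pvConsFirst]
        · simp only [hb, Bool.false_eq_true, if_false]
          rw [ih rest (by simp at hs; omega), ih rest (by simp at hs; omega) [ch] []]
          rcases hG : PySem.Chars.splitlines.go isB rest [] [] with _ | ⟨ln, lns⟩ <;>
            simp [pvConsFirst]

-- one-step evaluation lemmas for B's scanner
theorem pvAlt_crlf (rest : List Char) (l c : Int) (acc) :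
    parseAltGo ('\r' :: '\n' :: rest) l c acc = parseAltGo rest (l + 1) 0 acc := by
  rw [parseAltGo.eq_def]
  split
  · rename_i heq; cases heq
  · rename_i heq
    injection heq with h1 h2
    injection h2 with h3 h4
    subst h4; rfl
  · rename_i hno heq
    injection heq with h1 h2
    exact ((hno rest h1.symm h2.symm).elim)

theorem pvAlt_cons (ch : Char) (rest : List Char) (l c : Int) (acc)
    (h : ¬ (ch = '\r' ∧ ∃ r', rest = '\n' :: r')) :
    parseAltGo (ch :: rest) l c acc =
      (if ch = '\r' then parseAltGo rest (l + 1) 0 acc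
       else if ch = '\n' then parseAltGo rest (l + 1) 0 acc
       else parseAltGo rest l (c + 1) (pvStep l acc (c, ch))) := by
  rw [parseAltGo.eq_def]
  split
  · rename_i heq; cases heq
  · rename_i r' heq
    injection heq with h1 h2
    exact absurd ⟨h1, r', h2⟩ h
  · rename_i heq
    injection heq with h1 h2
    subst h1; subst h2
    simp [pvStep]

-- B's scanner agrees with folding pvStep over the lines of the remaining input,
-- provided isB breaks exactly on '\n' and '\r' among the characters present
theorem pvGo_eq_lineFold (isB : Char → Bool) :
    ∀ (n : Nat) (s : List Char), s.length ≤ n →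
      (∀ ch ∈ s, isB ch = true ↔ (ch = '\n' ∨ ch = '\r')) →
      ∀ (l c : Int) (acc : PySem.Set (Int × Int) × PySem.Set (Int × Int)),
      parseAltGo s l c acc =
        match PySem.Chars.splitlines.go isB s [] [] with
        | [] => acc
        | ln :: lns => pvLineFold (l + 1) lns ((PySem.List.enumerate ln c).foldl (pvStep l) acc) := by
  intro n
  induction n with
  | zero =>
    intro s hlen _ l c acc
    have : s = [] := by cases s <;> simp_all
    subst this
    simp [parseAltGo, pvGo_nil]
  | succ n ih =>
    intro s hlen hs l c acc
    by_cases hcr : ∃ rest, s = '\r' :: '\n' :: rest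
    · obtain ⟨rest, rfl⟩ := hcr
      have hrest : ∀ ch ∈ rest, isB ch = true ↔ (ch = '\n' ∨ ch = '\r') := by
        intro ch hch; exact hs ch (by simp [hch])
      rw [pvAlt_crlf, pvGo_crlf,
        pvGo_decomp isB rest.length rest le_rfl [] [[].reverse],
        ih rest (by simp at hlen; omega) hrest (l + 1) 0 acc]
      simp only [List.reverse_nil, pvConsFirst_nil, List.reverse_cons, List.nil_append,
        List.cons_append]
      rcases PySem.Chars.splitlines.go isB rest [] [] with _ | ⟨ln, lns⟩
      · simp [pvLineFold]
      · simp [pvLineFold_cons, PySem.List.enumerate_nil]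
    · rcases s with _ | ⟨ch, rest⟩
      · simp [parseAltGo, pvGo_nil]
      · have hns : ¬ (ch = '\r' ∧ ∃ r', rest = '\n' :: r') := by
          rintro ⟨rfl, r', rfl⟩; exact hcr ⟨r', rfl⟩
        have hrest : ∀ c ∈ rest, isB c = true ↔ (c = '\n' ∨ c = '\r') := by
          intro x hx; exact hs x (by simp [hx])
        rw [pvAlt_cons ch rest l c acc hns, pvGo_cons isB ch rest [] [] hns]
        by_cases hb : isB ch = true
        · have hch : ch = '\n' ∨ ch = '\r' := (hs ch (by simp)).mp hb
          have hLHS : (if ch = '\r' then parseAltGo rest (l + 1) 0 acc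
              else if ch = '\n' then parseAltGo rest (l + 1) 0 acc
              else parseAltGo rest l (c + 1) (pvStep l acc (c, ch))) =
              parseAltGo rest (l + 1) 0 acc := by
            rcases hch with h | h <;> simp [h]
          rw [if_pos hb,
            pvGo_decomp isB rest.length rest le_rfl [] [[].reverse], hLHS,
            ih rest (by simp at hlen; omega) hrest (l + 1) 0 acc]
          simp only [List.reverse_nil, pvConsFirst_nil, List.reverse_cons, List.nil_append,
            List.cons_append]
          rcases PySem.Chars.splitlines.go isB rest [] [] with _ | ⟨ln, lns⟩
          · simp [pvLineFold]
          · simp [pvLineFold_cons, PySem.List.enumerate_nil]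
        · have hch : ¬ (ch = '\n' ∨ ch = '\r') := fun h => hb ((hs ch (by simp)).mpr h)
          push Not at hch
          rw [if_neg hb, if_neg hch.2, if_neg hch.1,
            pvGo_decomp isB rest.length rest le_rfl [ch] [],
            ih rest (by simp at hlen; omega) hrest l (c + 1) (pvStep l acc (c, ch))]
          rcases PySem.Chars.splitlines.go isB rest [] [] with _ | ⟨ln, lns⟩
          · simp [pvConsFirst, pvLineFold, PySem.List.enumerate_cons,
              PySem.List.enumerate_nil]
          · simp [pvConsFirst, PySem.List.enumerate_cons]

-- the break test Chars.splitlines uses, named so it can be instantiated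
def pvIsB (c : Char) : Bool :=
  decide (c.toNat = 10) || decide (c.toNat = 13) || decide (c.toNat = 11) ||
  decide (c.toNat = 12) || decide (c.toNat = 28) || decide (c.toNat = 29) ||
  decide (c.toNat = 30) || decide (c.toNat = 133) || decide (c.toNat = 8232) ||
  decide (c.toNat = 8233)

theorem pvChar_eq_of_toNat (ch d : Char) (hn : ch.toNat = d.toNat) : ch = d := by
  have h1 := Char.ofNat_toNat ch
  have h2 := Char.ofNat_toNat d
  rw [hn, h2] at h1
  exact h1.symm

theorem parse_eq (data : String) (h : Dom_parse data) : parse data = parse_alt data := by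
  have hall : ∀ ch ∈ data.toList, pvDomChar ch = true := by
    simp only [Dom_parse, pvDomStr, List.all_eq_true] at h
    exact h
  have hs : ∀ ch ∈ data.toList, pvIsB ch = true ↔ (ch = '\n' ∨ ch = '\r') := by
    intro ch hch
    have hd := hall ch hch
    simp only [pvDomChar, Bool.or_eq_true, Bool.and_eq_true, decide_eq_true_eq,
      beq_iff_eq] at hd
    constructor
    · intro hb
      simp only [pvIsB, Bool.or_eq_true, decide_eq_true_eq] at hb
      have h1013 : ch.toNat = 10 ∨ ch.toNat = 13 := by omega
      rcases h1013 with h' | h'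
      · exact Or.inl (pvChar_eq_of_toNat ch '\n' h')
      · exact Or.inr (pvChar_eq_of_toNat ch '\r' h')
    · rintro (rfl | rfl) <;> decide
  rw [parse_as_fold, PySem.Str.splitlines_map_toList]
  have hgo : PySem.Chars.splitlines data.toList =
      PySem.Chars.splitlines.go pvIsB data.toList [] [] := rfl
  rw [hgo]
  show pvLineFold 0 (PySem.Chars.splitlines.go pvIsB data.toList [] []) ([], []) =
    parseAltGo data.toList 0 0 ([], [])
  rw [pvGo_eq_lineFold pvIsB data.toList.length data.toList le_rfl hs 0 0 ([], [])]
  rcases PySem.Chars.splitlines.go pvIsB data.toList [] [] with _ | ⟨ln, lns⟩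
  · rfl
  · rw [pvLineFold_cons]

-- ===== VERDICT (by name: the statement is the Claim_ definition above) =====
theorem parse_spec : Claim_equal_parse := by
  intro data h
  exact parse_eq data h
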